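-- pv_equiv track=rewrite | github.com/mjash93/mini-BLAST | mini-BLAST.py | all_kmer
-- ===== SOURCE A (Python) =====
-- def all_kmer(string, num_k):
-- 	"""
-- 		Function returns all instances of a kmere in list form. Returns a dict of kmere's with
-- 		the associated value being a list with the starting positions of each mere.
--
-- 		INPUTS:
-- 			> string -- sequence / database to sequence for k-mer's
-- 			> num_k -- number denoting the length of the k-mer to be searched
-- 	"""
-- 	kmer = {}
-- 	for i in range(0 , (len(string)-num_k+1)):
-- 		if string[i:(i+num_k)] not in kmer.keys():
-- 			kmer[string[i:(i+num_k)]] = [i]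
-- 		else:
-- 			kmer[string[i:(i+num_k)]].append(i)
-- 	return kmer
-- ===== SOURCE B (Python) =====
-- def all_kmer(string, num_k):
-- 	"""Key-major re-implementation: list all k-mers once, then build the dict
-- 	per distinct k-mer (first-occurrence order) by scanning the k-mer list."""
-- 	kmers = [string[i:(i + num_k)] for i in range(0, len(string) - num_k + 1)]
-- 	return {k: [i for i, x in enumerate(kmers) if x == k]
-- 	        for k in dict.fromkeys(kmers)}
-- ===== Notes on version B (the rewrite author's own statement) =====
-- stated objective: alternative
-- what changed: Replaces A's online dict accumulation (membership test + insert/append per position) with a key-major pipeline: build the k-mer list once, dedup it in first-occurrence order, and compute each key's position list by a comprehension over the enumerated k-mer list.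
import Mathlib
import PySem

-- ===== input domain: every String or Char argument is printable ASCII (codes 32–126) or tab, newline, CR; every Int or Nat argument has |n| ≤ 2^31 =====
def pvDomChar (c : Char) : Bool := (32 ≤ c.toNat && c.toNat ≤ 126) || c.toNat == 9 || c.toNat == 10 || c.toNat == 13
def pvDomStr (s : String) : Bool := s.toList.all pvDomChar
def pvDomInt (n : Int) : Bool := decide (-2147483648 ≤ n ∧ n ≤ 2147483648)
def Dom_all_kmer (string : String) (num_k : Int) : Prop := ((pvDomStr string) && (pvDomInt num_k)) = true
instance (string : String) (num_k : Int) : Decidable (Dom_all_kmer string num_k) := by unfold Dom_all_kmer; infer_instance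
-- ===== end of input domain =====

-- B replaces A's online dict accumulation with a key-major pipeline (dedup the k-mer list, then gather
-- each key's positions); same return value everywhere, no speed claim.

-- ===== PORT A =====
-- A: one pass over start positions, building the dict online (absent key: insert [i]; present: append i).
def all_kmer (string : String) (num_k : Int) : List (String × List Int) :=
  (List.foldl
    (fun kmer i =>
      if kmer.contains (PySem.Str.slice string (some i) (some (i + num_k))) = false then
        kmer.insert (PySem.Str.slice string (some i) (some (i + num_k))) [i]
      else
        kmer.insert (PySem.Str.slice string (some i) (some (i + num_k)))
          (kmer.getD (PySem.Str.slice string (some i) (some (i + num_k))) [] ++ [i]))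
    PySem.Dict.empty
    (PySem.List.pyRange 0 (PySem.Str.len string - num_k + 1) 1)).items

-- ===== PORT B =====
-- B: build the k-mer list once; per distinct k-mer (first-occurrence order, dict.fromkeys = dedup),
-- gather its positions by scanning the enumerated k-mer list.
def all_kmer_alt (string : String) (num_k : Int) : List (String × List Int) :=
  let kmers := (PySem.List.pyRange 0 (PySem.Str.len string - num_k + 1) 1).map
    (fun i => PySem.Str.slice string (some i) (some (i + num_k)))
  (PySem.List.dedup kmers).map (fun k =>
    (k, ((PySem.List.enumerate kmers 0).filter (fun p => p.2 == k)).map (fun p => p.1)))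

-- ===== PRECONDITION & SPEC =====
def Spec_all_kmer (string : String) (num_k : Int) (out : List (String × List Int)) : Prop := out = all_kmer_alt string num_k
instance (string : String) (num_k : Int) (out : List (String × List Int)) : Decidable (Spec_all_kmer string num_k out) := by unfold Spec_all_kmer; infer_instance

-- ===== CLAIM (what is proved, stated in full; the proofs are below) =====
def Claim_equal_all_kmer : Prop := ∀ (string : String) (num_k : Int), Dom_all_kmer string num_k → Spec_all_kmer string num_k (all_kmer string num_k)

-- ===== LEMMAS AND PROOFS =====

-- A dict with Nodup keys is its key list paired with the lookups.
theorem pv_items_eq_keys_map {κ ν : Type} [BEq κ] [LawfulBEq κ] (d : PySem.Dict κ ν) (v0 : ν)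
    (h : d.keys.Nodup) : d.items = d.keys.map (fun k => (k, d.getD k v0)) := by
  simp only [PySem.Dict.keys, List.map_map]
  symm
  calc d.items.map ((fun k => (k, d.getD k v0)) ∘ (fun p => p.1))
      = d.items.map id := by
        apply List.map_congr_left
        intro p hp
        have := PySem.Dict.getD_of_mem_items d (k := p.1) (v := p.2) (by simpa using hp) h v0
        simp [this]
    _ = d.items := List.map_id _

-- enumerate over a mapped range' of casts pairs each index with its image.
theorem pv_enum_map (f : Int → String) : ∀ (m s : Nat),
    PySem.List.enumerate ((List.range' s m).map (fun (j : Nat) => f (j : Int))) (s : Int)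
      = (List.range' s m).map (fun (j : Nat) => ((j : Int), f (j : Int))) := by
  intro m
  induction m with
  | zero => intro s; simp
  | succ n ih =>
      intro s
      rw [List.range'_succ, List.map_cons, List.map_cons, PySem.List.enumerate_cons]
      have h1 : ((s : Int) + 1) = ((s + 1 : Nat) : Int) := by push_cast; ring
      rw [h1, ih (s+1)]

-- A's branchy loop body IS Dict.modify (append under the key, default []).
theorem pv_body_eq_modify {κ : Type} [BEq κ] [LawfulBEq κ] (d : PySem.Dict κ (List Int)) (k : κ) (i : Int) :
    (if d.contains k = false then d.insert k [i] else d.insert k (d.getD k [] ++ [i]))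
      = d.modify k [] (fun v => v ++ [i]) := by
  by_cases h : d.contains k = false
  · simp [h, PySem.Dict.modify, PySem.Dict.getD, (PySem.Dict.get?_eq_none_iff_contains d k).2 h]
  · simp [h, PySem.Dict.modify]

-- Core equivalence, abstracted over the k-mer function and the range bound:
-- the grouping fold's items equal the dedup-then-gather list.
theorem pv_main (key : Int → String) (N : Int) :
    (((PySem.List.pyRange 0 N 1).map (fun i => (key i, i))).foldl
        (fun d p => d.modify p.1 [] (fun v => v ++ [p.2])) PySem.Dict.empty).items
      = (PySem.List.dedup ((PySem.List.pyRange 0 N 1).map key)).map (fun k =>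
          (k, ((PySem.List.enumerate ((PySem.List.pyRange 0 N 1).map key) 0).filter
                (fun p => p.2 == k)).map (fun p => p.1))) := by
  have hR : PySem.List.pyRange 0 N 1 = (List.range' 0 N.toNat).map (fun (j : Nat) => (j : Int)) := by
    rw [PySem.List.pyRange_one]
    simp [List.range_eq_range']
  have hnodup : ((((PySem.List.pyRange 0 N 1).map (fun i => (key i, i))).foldl
        (fun d p => d.modify p.1 [] (fun v => v ++ [p.2])) PySem.Dict.empty)).keys.Nodup :=
    PySem.Dict.nodup_keys_foldl_modify_key _ Prod.fst [] (fun _ p v => v ++ [p.2]) _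
      PySem.Dict.nodup_keys_empty
  rw [pv_items_eq_keys_map _ [] hnodup]
  rw [PySem.Dict.keys_foldl_modify_key]
  have hkeys : PySem.Set.update (PySem.Dict.empty (κ := String) (ν := List Int)).keys
      (((PySem.List.pyRange 0 N 1).map (fun i => (key i, i))).map Prod.fst)
      = PySem.List.dedup ((PySem.List.pyRange 0 N 1).map key) := by
    simp [PySem.Dict.keys_empty, PySem.Set.update, PySem.Set.ofList, PySem.Set.empty,
      PySem.List.dedup, List.map_map]
    simp only [Function.comp_def]
  rw [hkeys]
  apply List.map_congr_left
  intro k hk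
  rw [PySem.Dict.getD_foldl_modify_append, PySem.Dict.getD_empty]
  have henum : PySem.List.enumerate ((PySem.List.pyRange 0 N 1).map key) 0
      = (List.range' 0 N.toNat).map (fun (j : Nat) => ((j : Int), key (j : Int))) := by
    rw [hR, List.map_map]
    have := pv_enum_map (fun i => key i) N.toNat 0
    simpa using this
  rw [henum, hR]
  simp only [List.filter_map, List.map_map, Function.comp_def, List.nil_append]

theorem pv_a_spec (string : String) (num_k : Int) :
    all_kmer string num_k = all_kmer_alt string num_k := by
  unfold all_kmer all_kmer_alt
  rw [show (PySem.List.pyRange 0 (PySem.Str.len string - num_k + 1) 1).foldl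
      (fun kmer i =>
        if kmer.contains (PySem.Str.slice string (some i) (some (i + num_k))) = false then
          kmer.insert (PySem.Str.slice string (some i) (some (i + num_k))) [i]
        else
          kmer.insert (PySem.Str.slice string (some i) (some (i + num_k)))
            (kmer.getD (PySem.Str.slice string (some i) (some (i + num_k))) [] ++ [i]))
      PySem.Dict.empty
      = ((PySem.List.pyRange 0 (PySem.Str.len string - num_k + 1) 1).map
          (fun i => (PySem.Str.slice string (some i) (some (i + num_k)), i))).foldl
          (fun d p => d.modify p.1 [] (fun v => v ++ [p.2])) PySem.Dict.empty from by
    rw [List.foldl_map]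
    apply PySem.List.foldl_congr_mem
    intro acc i _
    exact pv_body_eq_modify acc _ i]
  exact pv_main (fun i => PySem.Str.slice string (some i) (some (i + num_k)))
    (PySem.Str.len string - num_k + 1)

-- ===== VERDICT (by name: the statement is the Claim_ definition above) =====
theorem all_kmer_spec : Claim_equal_all_kmer := by
  intro string num_k _
  exact pv_a_spec string num_k
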